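-- pv_equiv track=rewrite | github.com/danialo/ai-exp | src/services/research_formatter.py | _cluster_domains
-- ===== SOURCE A (Python) =====
-- from typing import Dict, Any, List
--
-- def _cluster_domains(docs: List[Dict]) -> Dict[str, List[str]]:
--     """
--     Cluster source URLs by domain type for provenance descriptions.
--
--     Returns:
--         Dict mapping domain type to list of domains
--         Example: {"news_wire": ["apnews.com", "reuters.com"], "local": [...]}
--     """
--     # Simple heuristic: parse domains and categorize
--     wire_services = {"apnews.com", "reuters.com", "ap.org", "upi.com"}
--     major_news = {"nytimes.com", "washingtonpost.com", "wsj.com", "theguardian.com", "bbc.com"}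
--     academic = {"arxiv.org", "nature.com", "science.org", "pubmed.ncbi.nlm.nih.gov"}
--     court = {"courtlistener.com", "supremecourt.gov", "pacer.gov"}
--
--     clusters = {
--         "wire": [],
--         "major_news": [],
--         "academic": [],
--         "court": [],
--         "other": []
--     }
--
--     for doc in docs:
--         url = doc.get("url", "")
--         if not url:
--             continue
--
--         try:
--             domain = url.split("/")[2]
--         except IndexError:
--             continue
--
--         if domain in wire_services:
--             clusters["wire"].append(domain)
--         elif domain in major_news:
--             clusters["major_news"].append(domain)
--         elif domain in academic:
--             clusters["academic"].append(domain)
--         elif domain in court: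
--             clusters["court"].append(domain)
--         else:
--             clusters["other"].append(domain)
--
--     return clusters
-- ===== SOURCE B (Python) =====
-- from typing import Dict, List
--
--
-- def _cluster_domains(docs: List[Dict]) -> Dict[str, List[str]]:
--     """Cluster source URLs by domain type: extract the domain stream once,
--     then build each cluster as an independent order-preserving filter of it."""
--     wire = {"apnews.com", "reuters.com", "ap.org", "upi.com"}
--     major = {"nytimes.com", "washingtonpost.com", "wsj.com", "theguardian.com", "bbc.com"}
--     academic = {"arxiv.org", "nature.com", "science.org", "pubmed.ncbi.nlm.nih.gov"}
--     court = {"courtlistener.com", "supremecourt.gov", "pacer.gov"}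
--
--     # Pass 1: the ordered stream of domains (skip falsy urls and urls with no third segment).
--     domains = []
--     for doc in docs:
--         url = doc.get("url", "")
--         if url:
--             parts = url.split("/")
--             if len(parts) > 2:
--                 domains.append(parts[2])
--
--     # Pass 2: each cluster is a filter of the stream; the categories are pairwise
--     # disjoint, so every domain lands in exactly one cluster, in stream order.
--     known = wire | major | academic | court
--     return {
--         "wire": [d for d in domains if d in wire],
--         "major_news": [d for d in domains if d in major],
--         "academic": [d for d in domains if d in academic],
--         "court": [d for d in domains if d in court],
--         "other": [d for d in domains if d not in known],
--     }
-- ===== Notes on version B (the rewrite author's own statement) =====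
-- stated objective: alternative
-- what changed: A makes one pass mutating a five-list dict via an if/elif membership cascade; B first extracts the ordered domain stream in one pass and then builds each of the five clusters as an independent order-preserving filter of that stream (correct because the four category sets are pairwise disjoint).
import Mathlib
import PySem

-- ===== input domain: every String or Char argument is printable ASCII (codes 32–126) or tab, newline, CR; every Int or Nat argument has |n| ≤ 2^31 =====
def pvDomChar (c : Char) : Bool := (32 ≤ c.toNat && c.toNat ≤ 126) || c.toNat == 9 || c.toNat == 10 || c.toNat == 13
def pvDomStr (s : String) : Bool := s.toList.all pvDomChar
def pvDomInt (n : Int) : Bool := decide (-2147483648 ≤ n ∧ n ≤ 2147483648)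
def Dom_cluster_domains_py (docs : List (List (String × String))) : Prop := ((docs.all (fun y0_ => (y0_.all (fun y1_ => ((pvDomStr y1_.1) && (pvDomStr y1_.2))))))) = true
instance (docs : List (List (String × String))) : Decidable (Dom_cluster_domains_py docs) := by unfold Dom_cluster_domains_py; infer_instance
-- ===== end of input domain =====

-- B replaces A's single mutating pass with staged passes: extract the ordered domain
-- stream once, then build each of the five clusters as an independent filter of it (objective: alternative).

-- ===== PORT A =====
-- the four Python set literals (membership-only sets)
def pvWireServices : List String := PySem.Set.ofList ["apnews.com", "reuters.com", "ap.org", "upi.com"]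
def pvMajorNews : List String := PySem.Set.ofList ["nytimes.com", "washingtonpost.com", "wsj.com", "theguardian.com", "bbc.com"]
def pvAcademic : List String := PySem.Set.ofList ["arxiv.org", "nature.com", "science.org", "pubmed.ncbi.nlm.nih.gov"]
def pvCourt : List String := PySem.Set.ofList ["courtlistener.com", "supremecourt.gov", "pacer.gov"]

-- the empty 5-key clusters dict
def pvClusters0 : PySem.Dict String (List String) :=
  PySem.Dict.ofList [("wire", []), ("major_news", []), ("academic", []), ("court", []), ("other", [])]

-- loop body of A: the if/elif/else membership cascade choosing the key to append to
def pvStepA (clusters : PySem.Dict String (List String)) (doc : List (String × String)) :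
    PySem.Dict String (List String) :=
  let url := (PySem.Dict.ofList doc).getD "url" ""
  if url = "" then clusters
  else
    match PySem.List.pyGet? ((PySem.Str.split? url "/").getD []) 2 with
    | none => clusters
    | some domain =>
      if pvWireServices.contains domain then clusters.modify "wire" [] (· ++ [domain])
      else if pvMajorNews.contains domain then clusters.modify "major_news" [] (· ++ [domain])
      else if pvAcademic.contains domain then clusters.modify "academic" [] (· ++ [domain])
      else if pvCourt.contains domain then clusters.modify "court" [] (· ++ [domain])
      else clusters.modify "other" [] (· ++ [domain])

def cluster_domains_py (docs : List (List (String × String))) : List (String × List String) :=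
  (docs.foldl pvStepA pvClusters0).items

-- ===== PORT B =====
-- B's pass 1: the ordered stream of domains
def pvExtractDomains (docs : List (List (String × String))) : List String :=
  docs.foldl (fun acc doc =>
    let url := (PySem.Dict.ofList doc).getD "url" ""
    if url = "" then acc
    else
      let parts := (PySem.Str.split? url "/").getD []
      if 2 < parts.length then acc ++ [parts.getD 2 ""] else acc) []

-- B's union of the known categories (wire | major | academic | court)
def pvKnown : List String :=
  PySem.Set.ofList (pvWireServices ++ pvMajorNews ++ pvAcademic ++ pvCourt)

-- B's pass 2: five independent filters of the stream
def cluster_domains_py_alt (docs : List (List (String × String))) : List (String × List String) :=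
  let domains := pvExtractDomains docs
  [("wire", domains.filter (fun d => pvWireServices.contains d)),
   ("major_news", domains.filter (fun d => pvMajorNews.contains d)),
   ("academic", domains.filter (fun d => pvAcademic.contains d)),
   ("court", domains.filter (fun d => pvCourt.contains d)),
   ("other", domains.filter (fun d => !(pvKnown.contains d)))]

-- ===== PRECONDITION & SPEC =====
def Spec_cluster_domains_py (docs : List (List (String × String))) (out : List (String × List String)) : Prop := out = cluster_domains_py_alt docs
instance (docs : List (List (String × String))) (out : List (String × List String)) : Decidable (Spec_cluster_domains_py docs out) := by unfold Spec_cluster_domains_py; infer_instance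

-- ===== CLAIM =====
def Claim_equal_cluster_domains_py : Prop := ∀ (docs : List (List (String × String))), Dom_cluster_domains_py docs → Spec_cluster_domains_py docs (cluster_domains_py docs)

-- ===== LEMMAS AND PROOFS =====
-- the single step of B's pass 1
def pvStepD (acc : List String) (doc : List (String × String)) : List String :=
  let url := (PySem.Dict.ofList doc).getD "url" ""
  if url = "" then acc
  else
    let parts := (PySem.Str.split? url "/").getD []
    if 2 < parts.length then acc ++ [parts.getD 2 ""] else acc

lemma extract_acc (docs : List (List (String × String))) (acc : List String) :
    docs.foldl pvStepD acc = acc ++ docs.foldl pvStepD [] := by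
  induction docs generalizing acc with
  | nil => simp
  | cons doc rest ih =>
    simp only [List.foldl_cons]
    rw [ih (pvStepD acc doc), ih (pvStepD [] doc)]
    simp [pvStepD]
    split_ifs <;> simp

lemma extract_eq (docs : List (List (String × String))) :
    pvExtractDomains docs = docs.foldl pvStepD [] := rfl

lemma extract_cons (doc : List (String × String)) (rest : List (List (String × String))) :
    pvExtractDomains (doc :: rest) = pvStepD [] doc ++ pvExtractDomains rest := by
  rw [extract_eq, List.foldl_cons, extract_acc, ← extract_eq]

-- membership in the literal sets as a disjunction of equalities
lemma wire_cases {d : String} (h : pvWireServices.contains d = true) :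
    d = "apnews.com" ∨ d = "reuters.com" ∨ d = "ap.org" ∨ d = "upi.com" := by
  have e : pvWireServices = ["apnews.com", "reuters.com", "ap.org", "upi.com"] := by decide
  rw [e] at h; simpa using h

lemma major_cases {d : String} (h : pvMajorNews.contains d = true) :
    d = "nytimes.com" ∨ d = "washingtonpost.com" ∨ d = "wsj.com" ∨ d = "theguardian.com" ∨ d = "bbc.com" := by
  have e : pvMajorNews = ["nytimes.com", "washingtonpost.com", "wsj.com", "theguardian.com", "bbc.com"] := by decide
  rw [e] at h; simpa using h

lemma academic_cases {d : String} (h : pvAcademic.contains d = true) :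
    d = "arxiv.org" ∨ d = "nature.com" ∨ d = "science.org" ∨ d = "pubmed.ncbi.nlm.nih.gov" := by
  have e : pvAcademic = ["arxiv.org", "nature.com", "science.org", "pubmed.ncbi.nlm.nih.gov"] := by decide
  rw [e] at h; simpa using h

lemma court_cases {d : String} (h : pvCourt.contains d = true) :
    d = "courtlistener.com" ∨ d = "supremecourt.gov" ∨ d = "pacer.gov" := by
  have e : pvCourt = ["courtlistener.com", "supremecourt.gov", "pacer.gov"] := by decide
  rw [e] at h; simpa using h

-- main invariant: folding A's step over a five-list dict appends the filtered stream to each list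
lemma main_inv (docs : List (List (String × String))) (w m a c o : List String) :
    docs.foldl pvStepA (PySem.Dict.mk [("wire", w), ("major_news", m), ("academic", a), ("court", c), ("other", o)])
      = PySem.Dict.mk
          [("wire", w ++ (pvExtractDomains docs).filter (fun d => pvWireServices.contains d)),
           ("major_news", m ++ (pvExtractDomains docs).filter (fun d => pvMajorNews.contains d)),
           ("academic", a ++ (pvExtractDomains docs).filter (fun d => pvAcademic.contains d)),
           ("court", c ++ (pvExtractDomains docs).filter (fun d => pvCourt.contains d)),
           ("other", o ++ (pvExtractDomains docs).filter (fun d => !(pvKnown.contains d)))] := by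
  induction docs generalizing w m a c o with
  | nil => simp [pvExtractDomains]
  | cons doc rest ih =>
    rw [extract_cons, List.foldl_cons]
    by_cases hu : (PySem.Dict.ofList doc).getD "url" "" = ""
    · have hd : pvStepD [] doc = [] := by simp [pvStepD, hu]
      have ha : pvStepA (PySem.Dict.mk [("wire", w), ("major_news", m), ("academic", a), ("court", c), ("other", o)]) doc
          = PySem.Dict.mk [("wire", w), ("major_news", m), ("academic", a), ("court", c), ("other", o)] := by
        simp [pvStepA, hu]
      rw [hd, ha, ih]; simp
    · rcases hg : PySem.List.pyGet? ((PySem.Str.split? ((PySem.Dict.ofList doc).getD "url" "") "/").getD []) 2 with _ | dm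
      · -- IndexError: no third segment
        have hg0 := hg
        rw [show (2 : Int) = ((2 : Nat) : Int) from rfl, PySem.List.pyGet?_natCast] at hg
        have hlen : ¬ 2 < ((PySem.Str.split? ((PySem.Dict.ofList doc).getD "url" "") "/").getD []).length := by
          have := List.getElem?_eq_none_iff.mp hg
          omega
        have hd : pvStepD [] doc = [] := by simp [pvStepD, hu, hlen]
        have ha : pvStepA (PySem.Dict.mk [("wire", w), ("major_news", m), ("academic", a), ("court", c), ("other", o)]) doc
            = PySem.Dict.mk [("wire", w), ("major_news", m), ("academic", a), ("court", c), ("other", o)] := by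
          simp only [pvStepA]
          rw [if_neg hu, hg0]
        rw [hd, ha, ih]; simp
      · -- got a domain dm
        have hg0 := hg
        rw [show (2 : Int) = ((2 : Nat) : Int) from rfl, PySem.List.pyGet?_natCast] at hg
        obtain ⟨hlen, hdm'⟩ := List.getElem?_eq_some_iff.mp hg
        have hd : pvStepD [] doc = [dm] := by simp [pvStepD, hu, hlen, hdm']
        have ha : pvStepA (PySem.Dict.mk [("wire", w), ("major_news", m), ("academic", a), ("court", c), ("other", o)]) doc
            = (if pvWireServices.contains dm then (PySem.Dict.mk [("wire", w), ("major_news", m), ("academic", a), ("court", c), ("other", o)]).modify "wire" [] (· ++ [dm])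
               else if pvMajorNews.contains dm then (PySem.Dict.mk [("wire", w), ("major_news", m), ("academic", a), ("court", c), ("other", o)]).modify "major_news" [] (· ++ [dm])
               else if pvAcademic.contains dm then (PySem.Dict.mk [("wire", w), ("major_news", m), ("academic", a), ("court", c), ("other", o)]).modify "academic" [] (· ++ [dm])
               else if pvCourt.contains dm then (PySem.Dict.mk [("wire", w), ("major_news", m), ("academic", a), ("court", c), ("other", o)]).modify "court" [] (· ++ [dm])
               else (PySem.Dict.mk [("wire", w), ("major_news", m), ("academic", a), ("court", c), ("other", o)]).modify "other" [] (· ++ [dm])) := by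
          simp only [pvStepA]
          rw [if_neg hu, hg0]
        rw [hd, ha]
        split_ifs with h1 h2 h3 h4
        · rcases wire_cases h1 with h | h | h | h <;> subst h <;>
            simp [PySem.Dict.modify, PySem.Dict.contains, PySem.Dict.get?, PySem.Dict.insert,
                  PySem.Dict.getD, ih, pvWireServices, pvMajorNews, pvAcademic, pvCourt, pvKnown,
                  PySem.Set.ofList, PySem.Set.add]
        · rcases major_cases h2 with h | h | h | h | h <;> subst h <;>
            simp [PySem.Dict.modify, PySem.Dict.contains, PySem.Dict.get?, PySem.Dict.insert,
                  PySem.Dict.getD, ih, pvWireServices, pvMajorNews, pvAcademic, pvCourt, pvKnown,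
                  PySem.Set.ofList, PySem.Set.add]
        · rcases academic_cases h3 with h | h | h | h <;> subst h <;>
            simp [PySem.Dict.modify, PySem.Dict.contains, PySem.Dict.get?, PySem.Dict.insert,
                  PySem.Dict.getD, ih, pvWireServices, pvMajorNews, pvAcademic, pvCourt, pvKnown,
                  PySem.Set.ofList, PySem.Set.add]
        · rcases court_cases h4 with h | h | h <;> subst h <;>
            simp [PySem.Dict.modify, PySem.Dict.contains, PySem.Dict.get?, PySem.Dict.insert,
                  PySem.Dict.getD, ih, pvWireServices, pvMajorNews, pvAcademic, pvCourt, pvKnown,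
                  PySem.Set.ofList, PySem.Set.add]
        · have n1 : dm ∉ pvWireServices := by simpa using h1
          have n2 : dm ∉ pvMajorNews := by simpa using h2
          have n3 : dm ∉ pvAcademic := by simpa using h3
          have n4 : dm ∉ pvCourt := by simpa using h4
          have n5 : dm ∉ pvKnown := by
            rw [show pvKnown = pvWireServices ++ pvMajorNews ++ pvAcademic ++ pvCourt from by decide]
            simp [n1, n2, n3, n4]
          simp [PySem.Dict.modify, PySem.Dict.contains, PySem.Dict.get?, PySem.Dict.insert,
                PySem.Dict.getD, ih, n1, n2, n3, n4, n5]

-- ===== VERDICT =====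
theorem cluster_domains_py_spec : Claim_equal_cluster_domains_py := by
  intro docs _
  unfold Spec_cluster_domains_py cluster_domains_py cluster_domains_py_alt
  have h0 : pvClusters0 = PySem.Dict.mk [("wire", []), ("major_news", []), ("academic", []), ("court", []), ("other", [])] := by decide
  rw [h0, main_inv]
  simp
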